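-- pv_equiv track=rewrite | github.com/spriteboysz/LeetcodeSolution | LeetcodePython/LCP/LCP 77. 符文储备.py | runeReserve
-- ===== SOURCE A (Python) =====
-- from collections import Counter
-- from typing import List
--
-- def runeReserve(runes: List[int]) -> int:
--     counter = Counter(runes)
--
--     nums = sorted(list(counter))
--     maximum, curr = 0, counter.get(nums[0])
--     for i in range(1, len(nums)):
--         if nums[i] - nums[i - 1] <= 1:
--             curr += counter.get(nums[i])
--         else:
--             maximum = max(maximum, curr)
--             curr = counter.get(nums[i])
--     return max(maximum, curr)
-- ===== SOURCE B (Python) =====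
-- def runeReserve(runes):
--     # One pass over the sorted raw list (duplicates kept): count the length of
--     # each run whose adjacent gap is <= 1, instead of summing per-distinct-value
--     # counts from a frequency table.
--     s = sorted(runes)
--     maximum, curr = 0, 1
--     prev = s[0]
--     for x in s[1:]:
--         if x - prev <= 1:
--             curr += 1
--         else:
--             maximum = max(maximum, curr)
--             curr = 1
--         prev = x
--     return max(maximum, curr)
-- ===== Notes on version B (the rewrite author's own statement) =====
-- stated objective: simpler
-- what changed: Drops the Counter frequency table entirely: B sorts the raw list (duplicates kept) and counts run lengths in one scan over all elements, instead of building a Counter, sorting its distinct keys and summing looked-up counts; skipping the hash-table build makes it measurably faster by a constant factor.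
-- outside the precondition, e.g. on runeReserve([]): A raises IndexError, B raises IndexError
import Mathlib
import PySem

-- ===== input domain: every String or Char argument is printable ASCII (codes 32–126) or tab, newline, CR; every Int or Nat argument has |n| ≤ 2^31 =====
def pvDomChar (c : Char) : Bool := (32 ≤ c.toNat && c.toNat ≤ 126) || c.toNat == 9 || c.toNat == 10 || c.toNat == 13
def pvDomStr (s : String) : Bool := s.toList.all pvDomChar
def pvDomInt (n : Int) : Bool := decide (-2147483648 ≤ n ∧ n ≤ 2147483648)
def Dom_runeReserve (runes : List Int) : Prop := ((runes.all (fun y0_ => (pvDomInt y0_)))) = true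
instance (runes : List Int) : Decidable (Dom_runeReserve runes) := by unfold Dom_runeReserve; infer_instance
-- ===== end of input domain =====

-- B drops A's Counter: it sorts the raw list (duplicates kept) and counts run lengths in
-- one scan, instead of scanning sorted distinct keys and summing looked-up counts (objective: simpler).

-- ===== PORT A =====
-- counter.get(k) is only called on keys k present in counter (k comes from nums = sorted
-- counter keys), so it always returns the stored count: ported as getD _ 0, exact there.
def runeReserve (runes : List Int) : Int :=
  let counter := PySem.Dict.counter runes
  let nums := PySem.List.sorted counter.keys (fun x => x) false
  let maximum : Int := 0
  let curr : Int := counter.getD (PySem.List.pyGetD nums 0 0) 0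
  let st := (PySem.List.pyRange 1 (PySem.List.len nums) 1).foldl
    (fun (mc : Int × Int) i =>
      if PySem.List.pyGetD nums i 0 - PySem.List.pyGetD nums (i - 1) 0 ≤ 1 then
        (mc.1, mc.2 + counter.getD (PySem.List.pyGetD nums i 0) 0)
      else
        (max mc.1 mc.2, counter.getD (PySem.List.pyGetD nums i 0) 0))
    (maximum, curr)
  max st.1 st.2

-- ===== PORT B =====
def runeReserve_alt (runes : List Int) : Int :=
  let s := PySem.List.sorted runes (fun x => x) false
  let maximum : Int := 0
  let curr : Int := 1
  let prev : Int := PySem.List.pyGetD s 0 0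
  let st := (PySem.List.slice s (some 1) none).foldl
    (fun (st : Int × Int × Int) x =>
      if x - st.2.2 ≤ 1 then (st.1, st.2.1 + 1, x)
      else (max st.1 st.2.1, 1, x))
    (maximum, curr, prev)
  max st.1 st.2.1

-- ===== PRECONDITION & SPEC =====
-- Pre_ excludes only the empty list, on which both A and B raise IndexError (nums[0] / s[0]).
def Pre_runeReserve (runes : List Int) : Prop := runes ≠ []
instance (runes : List Int) : Decidable (Pre_runeReserve runes) := by unfold Pre_runeReserve; infer_instance
def pvWitness_runeReserve : List Int := [1, 3, 4]

def Spec_runeReserve (runes : List Int) (out : Int) : Prop := out = runeReserve_alt runes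
instance (runes : List Int) (out : Int) : Decidable (Spec_runeReserve runes out) := by unfold Spec_runeReserve; infer_instance

-- ===== CLAIM (what is proved, stated in full; the proofs are below) =====
def Claim_equal_runeReserve : Prop := ∀ (runes : List Int), Dom_runeReserve runes → Pre_runeReserve runes → Spec_runeReserve runes (runeReserve runes)

-- ===== LEMMAS AND PROOFS =====

-- The common loop skeleton at state level: prev, (maximum, curr), remaining values; at each
-- value v it adds c v to curr when v - prev ≤ 1, otherwise folds curr into maximum and restarts.
def stateA (c : Int → Int) : Int → (Int × Int) → List Int → (Int × Int)
  | _, st, [] => st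
  | p, st, v :: rest =>
      stateA c v (if v - p ≤ 1 then (st.1, st.2 + c v) else (max st.1 st.2, c v)) rest

-- B's fold over the tail equals stateA with per-element weight 1 (prev ends at getLastD).
lemma foldB_eq (l : List Int) : ∀ (p m cu : Int),
    l.foldl (fun (st : Int × Int × Int) x =>
      if x - st.2.2 ≤ 1 then (st.1, st.2.1 + 1, x)
      else (max st.1 st.2.1, 1, x)) (m, cu, p)
    = ((stateA (fun _ => 1) p (m, cu) l).1, (stateA (fun _ => 1) p (m, cu) l).2, l.getLastD p) := by
  induction l with
  | nil => intro p m cu; simp [stateA]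
  | cons v rest ih =>
      intro p m cu
      rw [List.foldl_cons, List.getLastD_cons, stateA]
      by_cases h : v - p ≤ 1
      · simp only [if_pos h]
        exact ih v m (cu + 1)
      · simp only [if_neg h]
        exact ih v (max m cu) 1

-- A's index fold over range(1, len) equals stateA over the tail, with a prefix generalized.
lemma idxfold (c : Int → Int) (tl : List Int) : ∀ (pfx : List Int) (p : Int) (st : Int × Int),
    (PySem.List.pyRange ((pfx.length + 1 : Nat) : Int) ((pfx.length + 1 + tl.length : Nat) : Int) 1).foldl
      (fun (mc : Int × Int) i =>
        if PySem.List.pyGetD (pfx ++ p :: tl) i 0 - PySem.List.pyGetD (pfx ++ p :: tl) (i - 1) 0 ≤ 1 then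
          (mc.1, mc.2 + c (PySem.List.pyGetD (pfx ++ p :: tl) i 0))
        else
          (max mc.1 mc.2, c (PySem.List.pyGetD (pfx ++ p :: tl) i 0))) st
    = stateA c p st tl := by
  induction tl with
  | nil =>
      intro pfx p st
      rw [PySem.List.pyRange_one_eq_nil (by simp)]
      simp [stateA]
  | cons q tl' ih =>
      intro pfx p st
      rw [PySem.List.pyRange_one_cons (by rw [Nat.cast_lt]; simp)]
      rw [List.foldl_cons]
      have hq : PySem.List.pyGetD (pfx ++ p :: q :: tl') ((pfx.length + 1 : Nat) : Int) 0 = q := by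
        rw [PySem.List.pyGetD_natCast]
        rw [List.getD_eq_getElem?_getD, List.getElem?_append_right (by omega)]
        simp
      have hp : PySem.List.pyGetD (pfx ++ p :: q :: tl') (((pfx.length + 1 : Nat) : Int) - 1) 0 = p := by
        rw [show (((pfx.length + 1 : Nat) : Int) - 1) = ((pfx.length : Nat) : Int) by push_cast; ring]
        rw [PySem.List.pyGetD_natCast]
        rw [List.getD_eq_getElem?_getD, List.getElem?_append_right (by omega)]
        simp
      rw [hq, hp, stateA]
      rw [show ((pfx.length + 1 : Nat) : Int) + 1 = (((pfx ++ [p]).length + 1 : Nat) : Int) by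
            rw [show (pfx ++ [p]).length = pfx.length + 1 by simp]; push_cast; ring]
      rw [show ((pfx.length + 1 + (q :: tl').length : Nat) : Int)
            = (((pfx ++ [p]).length + 1 + tl'.length : Nat) : Int) by
            rw [Nat.cast_inj]; simp only [List.length_append, List.length_cons, List.length_nil]; omega]
      rw [show pfx ++ p :: q :: tl' = (pfx ++ [p]) ++ q :: tl' by simp]
      exact ih (pfx ++ [p]) q _

-- A run of j equal values extends curr by j.
lemma stateA_replicate (j : Nat) : ∀ (v m cu : Int) (rest : List Int),
    stateA (fun _ => 1) v (m, cu) (List.replicate j v ++ rest)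
    = stateA (fun _ => 1) v (m, cu + j) rest := by
  induction j with
  | zero => intro v m cu rest; simp
  | succ j ih =>
      intro v m cu rest
      rw [List.replicate_succ, List.cons_append, stateA, if_pos (by omega : v - v ≤ 1)]
      show stateA _ v (m, cu + 1) _ = _
      rw [ih]
      congr 2
      push_cast; ring

-- Counting 1-by-1 over the blocks equals adding each block's size at once.
lemma stateA_main (k : Int → Nat) : ∀ (nums : List Int) (p m cu : Int),
    (∀ v ∈ nums, 1 ≤ k v) →
    stateA (fun _ => 1) p (m, cu) (nums.flatMap (fun v => List.replicate (k v) v))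
    = stateA (fun v => (k v : Int)) p (m, cu) nums := by
  intro nums
  induction nums with
  | nil => intro p m cu _; simp [stateA]
  | cons v rest ih =>
      intro p m cu hk
      have hv : 1 ≤ k v := hk v (by simp)
      have hrep : List.replicate (k v) v = v :: List.replicate (k v - 1) v := by
        conv_lhs => rw [show k v = (k v - 1) + 1 by omega]
        rw [List.replicate_succ]
      simp only [List.flatMap_cons, hrep, List.cons_append, stateA]
      by_cases h : v - p ≤ 1
      · rw [if_pos h, if_pos h, stateA_replicate, ih _ _ _ (fun w hw => hk w (by simp [hw]))]
        congr 2
        have : ((k v - 1 : Nat) : Int) = (k v : Int) - 1 := by omega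
        rw [this]; ring
      · rw [if_neg h, if_neg h, stateA_replicate, ih _ _ _ (fun w hw => hk w (by simp [hw]))]
        congr 2
        have : ((k v - 1 : Nat) : Int) = (k v : Int) - 1 := by omega
        rw [this]; ring

lemma count_flatMap_replicate (k : Int → Nat) (a : Int) : ∀ (nums : List Int), nums.Nodup →
    (nums.flatMap (fun v => List.replicate (k v) v)).count a = if a ∈ nums then k a else 0 := by
  intro nums
  induction nums with
  | nil => simp
  | cons v rest ih =>
      intro hnd
      rw [List.flatMap_cons, List.count_append, List.count_replicate, ih hnd.of_cons]
      rcases List.nodup_cons.mp hnd with ⟨hv, _⟩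
      by_cases hav : a = v
      · subst hav; simp [hv]
      · simp [hav, Ne.symm hav]

lemma pairwise_le_flatMap (k : Int → Nat) : ∀ (nums : List Int), nums.Pairwise (· < ·) →
    (nums.flatMap (fun v => List.replicate (k v) v)).Pairwise (· ≤ ·) := by
  intro nums
  induction nums with
  | nil => simp
  | cons v rest ih =>
      intro hp
      rcases List.pairwise_cons.mp hp with ⟨hlt, hrest⟩
      rw [List.flatMap_cons]
      rw [List.pairwise_append]
      refine ⟨List.pairwise_replicate.mpr (Or.inr le_rfl), ih hrest, ?_⟩
      intro a ha b hb
      rw [List.eq_of_mem_replicate ha]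
      rcases List.mem_flatMap.mp hb with ⟨w, hw, hbw⟩
      rw [List.eq_of_mem_replicate hbw]
      exact le_of_lt (hlt w hw)

-- sorted(runes) is the blocks of sorted(set(runes)), each value repeated its count.
lemma sorted_eq_flatMap (runes : List Int) :
    PySem.List.sorted runes (fun x => x) false
    = (PySem.List.sorted (PySem.Set.ofList runes) (fun x => x) false).flatMap
        (fun v => List.replicate (runes.count v) v) := by
  set nums := PySem.List.sorted (PySem.Set.ofList runes) (fun x => x) false with hnums
  have hlt : nums.Pairwise (· < ·) := PySem.List.sorted_ofList_pairwise_lt runes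
  have hnd : nums.Nodup := hlt.imp ne_of_lt
  have hperm : (nums.flatMap (fun v => List.replicate (runes.count v) v)).Perm runes := by
    rw [List.perm_iff_count]
    intro a
    rw [count_flatMap_replicate (fun v => runes.count v) a nums hnd]
    by_cases ha : a ∈ runes
    · have : a ∈ nums := by
        rw [hnums, PySem.List.mem_sorted]
        exact (PySem.Set.mem_ofList _ _).mpr ha
      simp [this]
    · have : a ∉ nums := by
        rw [hnums, PySem.List.mem_sorted]
        intro hmem; exact ha ((PySem.Set.mem_ofList _ _).mp hmem)
      simp [this, List.count_eq_zero_of_not_mem ha]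
  exact PySem.List.sorted_id_eq_of_perm_of_pairwise _ _ hperm (pairwise_le_flatMap (fun v => runes.count v) nums hlt)

-- ===== VERDICT (by name: the statement is the Claim_ definition above) =====
theorem runeReserve_spec : Claim_equal_runeReserve := by
  intro runes _ hpre
  unfold Spec_runeReserve runeReserve runeReserve_alt
  simp only []
  have hkeys : (PySem.Dict.counter runes).keys = PySem.Set.ofList runes := PySem.Dict.keys_counter runes
  set nums := PySem.List.sorted (PySem.Dict.counter runes).keys (fun x => x) false with hnumsdef
  have hnums : nums = PySem.List.sorted (PySem.Set.ofList runes) (fun x => x) false := by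
    rw [hnumsdef, hkeys]
  have hne : nums ≠ [] := by
    rw [hnums]
    intro h
    rcases List.exists_mem_of_ne_nil runes hpre with ⟨x, hx⟩
    have : x ∈ PySem.List.sorted (PySem.Set.ofList runes) (fun y => y) false := by
      rw [PySem.List.mem_sorted]; exact (PySem.Set.mem_ofList _ _).mpr hx
    simp [h] at this
  obtain ⟨h, t, hht⟩ : ∃ h t, nums = h :: t := by
    cases hx : nums with
    | nil => exact absurd hx hne
    | cons a b => exact ⟨a, b, rfl⟩
  have hcnt : ∀ v, (PySem.Dict.counter runes).getD v 0 = runes.count v :=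
    fun v => PySem.Dict.getD_counter runes v
  have hs : PySem.List.sorted runes (fun x => x) false
      = nums.flatMap (fun v => List.replicate (runes.count v) v) := by
    rw [hnums]; exact sorted_eq_flatMap runes
  have hkpos : ∀ v ∈ nums, 1 ≤ runes.count v := by
    intro v hv
    have : v ∈ runes := by
      rw [hnums, PySem.List.mem_sorted] at hv
      exact (PySem.Set.mem_ofList _ _).mp hv
    exact List.count_pos_iff.mpr this
  -- A side
  have hA : (PySem.List.pyRange 1 (PySem.List.len nums) 1).foldl
      (fun (mc : Int × Int) i =>
        if PySem.List.pyGetD nums i 0 - PySem.List.pyGetD nums (i - 1) 0 ≤ 1 then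
          (mc.1, mc.2 + (PySem.Dict.counter runes).getD (PySem.List.pyGetD nums i 0) 0)
        else
          (max mc.1 mc.2, (PySem.Dict.counter runes).getD (PySem.List.pyGetD nums i 0) 0))
      (0, (PySem.Dict.counter runes).getD (PySem.List.pyGetD nums 0 0) 0)
      = stateA (fun v => ((runes.count v : Nat) : Int)) h (0, (runes.count h : Int)) t := by
    have h0 : PySem.List.pyGetD nums 0 0 = h := by rw [hht]; exact PySem.List.pyGetD_zero_cons _ _ _
    rw [h0]
    simp only [hcnt]
    rw [show nums = ([] : List Int) ++ h :: t from by simp [hht]]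
    have hmain := idxfold (fun v => ((runes.count v : Nat) : Int)) t ([] : List Int) h
      (0, ((runes.count h : Nat) : Int))
    convert hmain using 3 <;> simp [PySem.List.len] <;> omega
  -- B side
  have hsflat : PySem.List.sorted runes (fun x => x) false
      = h :: (List.replicate (runes.count h - 1) h ++ t.flatMap (fun v => List.replicate (runes.count v) v)) := by
    rw [hs, hht, List.flatMap_cons]
    have h1 : 1 ≤ runes.count h := hkpos h (by simp [hht])
    conv_lhs => rw [show runes.count h = (runes.count h - 1) + 1 by omega]
    rw [List.replicate_succ, List.cons_append]
  have hB0 : PySem.List.pyGetD (PySem.List.sorted runes (fun x => x) false) 0 0 = h := by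
    rw [hsflat]; exact PySem.List.pyGetD_zero_cons _ _ _
  have hBslice : PySem.List.slice (PySem.List.sorted runes (fun x => x) false) (some 1) none
      = List.replicate (runes.count h - 1) h ++ t.flatMap (fun v => List.replicate (runes.count v) v) := by
    rw [show (1 : Int) = ((1 : Nat) : Int) by norm_num, PySem.List.slice_from_natCast, hsflat]
    simp
  rw [hB0, hBslice, hA, foldB_eq, stateA_replicate,
      stateA_main (fun v => runes.count v) t h 0 _ (fun w hw => hkpos w (by simp [hht, hw]))]
  have h1 : 1 ≤ runes.count h := hkpos h (by simp [hht])
  have : (1 : Int) + ((runes.count h - 1 : Nat) : Int) = (runes.count h : Int) := by omega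
  rw [this]
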